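-- pv_equiv track=rewrite | github.com/nizamogluyekta/LLM_Benchmark | src/benchmark/services/model_service.py | _generate_model_tags
-- ===== SOURCE A (Python) =====
-- def _generate_model_tags(plugin_name: str, model_name: str) -> list[str]:
--     """Generate tags for model categorization."""
--     tags = [plugin_name.replace("_", "-")]
--
--     name_lower = model_name.lower()
--
--     # Size tags
--     if any(size in name_lower for size in ["mini", "small", "7b"]):
--         tags.append("small")
--     elif any(size in name_lower for size in ["medium", "13b"]):
--         tags.append("medium")
--     elif any(size in name_lower for size in ["large", "30b", "33b", "70b"]):
--         tags.append("large")
--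
--     # Capability tags
--     if "chat" in name_lower:
--         tags.append("conversational")
--     if "code" in name_lower:
--         tags.append("code-generation")
--     if "instruct" in name_lower:
--         tags.append("instruction-following")
--
--     # Performance tags
--     if "turbo" in name_lower:
--         tags.append("fast")
--     if "gpt-4" in name_lower or "opus" in name_lower:
--         tags.append("high-quality")
--
--     return tags
-- ===== SOURCE B (Python) =====
-- # One multi-pattern scan over the (lowercased) name: at each position collect every
-- # keyword starting there into a found-set, then derive tags from that set via rule groups.
-- _KEYWORDS = ["mini", "small", "7b", "medium", "13b", "large", "30b", "33b", "70b",
--              "chat", "code", "instruct", "turbo", "gpt-4", "opus"]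
--
-- _SIZE_GROUPS = [
--     ("small", {"mini", "small", "7b"}),
--     ("medium", {"medium", "13b"}),
--     ("large", {"large", "30b", "33b", "70b"}),
-- ]
--
-- _FEATURE_GROUPS = [
--     ("conversational", {"chat"}),
--     ("code-generation", {"code"}),
--     ("instruction-following", {"instruct"}),
--     ("fast", {"turbo"}),
--     ("high-quality", {"gpt-4", "opus"}),
-- ]
--
--
-- def _generate_model_tags(plugin_name: str, model_name: str) -> list[str]:
--     name_lower = model_name.lower()
--     found = set()
--     for i in range(len(name_lower) + 1):
--         suffix = name_lower[i:]
--         for kw in _KEYWORDS: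
--             if suffix.startswith(kw):
--                 found.add(kw)
--     tags = [plugin_name.replace("_", "-")]
--     for tag, kws in _SIZE_GROUPS:
--         if kws & found:
--             tags.append(tag)
--             break
--     for tag, kws in _FEATURE_GROUPS:
--         if kws & found:
--             tags.append(tag)
--     return tags
-- ===== Notes on version B (the rewrite author's own statement) =====
-- stated objective: alternative
-- what changed: Instead of A's fifteen independent 'in' substring searches over the name, B makes one multi-pattern scan over the lowercased name (at each position it collects every keyword that starts there into a found-set) and then derives the tags from that set via size/feature rule groups using set intersection, with the size loop breaking at the first matching group.
import Mathlib
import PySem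

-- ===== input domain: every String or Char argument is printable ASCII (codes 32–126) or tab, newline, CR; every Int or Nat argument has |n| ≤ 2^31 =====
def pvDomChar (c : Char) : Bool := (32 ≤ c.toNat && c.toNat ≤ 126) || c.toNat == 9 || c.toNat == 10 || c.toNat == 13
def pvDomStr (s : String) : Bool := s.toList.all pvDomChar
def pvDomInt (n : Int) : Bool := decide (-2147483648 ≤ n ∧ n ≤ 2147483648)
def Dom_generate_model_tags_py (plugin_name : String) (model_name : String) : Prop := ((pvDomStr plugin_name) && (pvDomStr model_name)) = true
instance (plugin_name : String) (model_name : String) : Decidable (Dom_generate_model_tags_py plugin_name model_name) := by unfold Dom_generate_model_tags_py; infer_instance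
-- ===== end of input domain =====

-- B replaces A's fifteen independent `in` substring tests by ONE multi-pattern scan over the
-- lowercased name (collecting every keyword that starts at each position into a found-set),
-- then derives the tags from that set via rule groups; same output, different traversal.

-- ===== PORT A =====
def generate_model_tags_py (plugin_name : String) (model_name : String) : List String :=
  let tags := [PySem.Str.replace plugin_name "_" "-"]
  let name_lower := PySem.Str.lower model_name
  let tags :=
    if ["mini", "small", "7b"].any (fun size => PySem.Str.isIn size name_lower) then
      tags ++ ["small"]
    else if ["medium", "13b"].any (fun size => PySem.Str.isIn size name_lower) then
      tags ++ ["medium"]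
    else if ["large", "30b", "33b", "70b"].any (fun size => PySem.Str.isIn size name_lower) then
      tags ++ ["large"]
    else tags
  let tags := if PySem.Str.isIn "chat" name_lower then tags ++ ["conversational"] else tags
  let tags := if PySem.Str.isIn "code" name_lower then tags ++ ["code-generation"] else tags
  let tags := if PySem.Str.isIn "instruct" name_lower then tags ++ ["instruction-following"] else tags
  let tags := if PySem.Str.isIn "turbo" name_lower then tags ++ ["fast"] else tags
  let tags :=
    if PySem.Str.isIn "gpt-4" name_lower || PySem.Str.isIn "opus" name_lower then
      tags ++ ["high-quality"]
    else tags
  tags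

-- ===== PORT B =====
def gmtKeywords : List String :=
  ["mini", "small", "7b", "medium", "13b", "large", "30b", "33b", "70b",
   "chat", "code", "instruct", "turbo", "gpt-4", "opus"]

def gmtSizeGroups : List (String × PySem.Set String) :=
  [("small", PySem.Set.ofList ["mini", "small", "7b"]),
   ("medium", PySem.Set.ofList ["medium", "13b"]),
   ("large", PySem.Set.ofList ["large", "30b", "33b", "70b"])]

def gmtFeatureGroups : List (String × PySem.Set String) :=
  [("conversational", PySem.Set.ofList ["chat"]),
   ("code-generation", PySem.Set.ofList ["code"]),
   ("instruction-following", PySem.Set.ofList ["instruct"]),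
   ("fast", PySem.Set.ofList ["turbo"]),
   ("high-quality", PySem.Set.ofList ["gpt-4", "opus"])]

-- inner `for kw in _KEYWORDS: if suffix.startswith(kw): found.add(kw)` at one position
def gmtScanPos (name_lower : String) (acc : PySem.Set String) (i : Int) : PySem.Set String :=
  let suffix := PySem.Str.slice name_lower (some i) none
  gmtKeywords.foldl (fun a kw => if PySem.Str.startswith suffix kw then PySem.Set.add a kw else a) acc

-- `for tag, kws in _SIZE_GROUPS: if kws & found: tags.append(tag); break`
def gmtSizeLoop : List (String × PySem.Set String) → PySem.Set String → List String → List String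
  | [], _, tags => tags
  | (tag, kws) :: rest, found, tags =>
    if PySem.Set.inter kws found ≠ [] then tags ++ [tag] else gmtSizeLoop rest found tags

-- `for tag, kws in _FEATURE_GROUPS: if kws & found: tags.append(tag)`
def gmtFeatureLoop : List (String × PySem.Set String) → PySem.Set String → List String → List String
  | [], _, tags => tags
  | (tag, kws) :: rest, found, tags =>
    gmtFeatureLoop rest found (if PySem.Set.inter kws found ≠ [] then tags ++ [tag] else tags)

def generate_model_tags_py_alt (plugin_name : String) (model_name : String) : List String :=
  let name_lower := PySem.Str.lower model_name
  let found : PySem.Set String :=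
    (PySem.List.pyRange 0 (PySem.Str.len name_lower + 1) 1).foldl (gmtScanPos name_lower) PySem.Set.empty
  let tags := [PySem.Str.replace plugin_name "_" "-"]
  let tags := gmtSizeLoop gmtSizeGroups found tags
  gmtFeatureLoop gmtFeatureGroups found tags

-- ===== PRECONDITION & SPEC =====
def Spec_generate_model_tags_py (plugin_name : String) (model_name : String) (out : List String) : Prop := out = generate_model_tags_py_alt plugin_name model_name
instance (plugin_name : String) (model_name : String) (out : List String) : Decidable (Spec_generate_model_tags_py plugin_name model_name out) := by unfold Spec_generate_model_tags_py; infer_instance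

-- ===== CLAIM (what is proved, stated in full; the proofs are below) =====
def Claim_equal_generate_model_tags_py : Prop := ∀ (plugin_name : String) (model_name : String), Dom_generate_model_tags_py plugin_name model_name → Spec_generate_model_tags_py plugin_name model_name (generate_model_tags_py plugin_name model_name)

-- ===== LEMMAS AND PROOFS =====

theorem gmt_mem_inner (suffix : String) (ks : List String) (acc : PySem.Set String) (x : String) :
    x ∈ ks.foldl (fun a kw => if PySem.Str.startswith suffix kw then PySem.Set.add a kw else a) acc ↔
      x ∈ acc ∨ (x ∈ ks ∧ PySem.Str.startswith suffix x = true) := by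
  induction ks generalizing acc with
  | nil => simp
  | cons k ks ih =>
    simp only [List.foldl_cons]
    by_cases h : PySem.Str.startswith suffix k = true
    · rw [if_pos h, ih]
      simp only [PySem.Set.mem_add, List.mem_cons]
      constructor
      · rintro ((hx | rfl) | ⟨hk, hs⟩)
        · exact Or.inl hx
        · exact Or.inr ⟨Or.inl rfl, h⟩
        · exact Or.inr ⟨Or.inr hk, hs⟩
      · rintro (hx | ⟨(rfl | hk), hs⟩)
        · exact Or.inl (Or.inl hx)
        · exact Or.inl (Or.inr rfl)
        · exact Or.inr ⟨hk, hs⟩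
    · rw [if_neg h, ih]
      simp only [List.mem_cons]
      constructor
      · rintro (hx | ⟨hk, hs⟩)
        · exact Or.inl hx
        · exact Or.inr ⟨Or.inr hk, hs⟩
      · rintro (hx | ⟨(rfl | hk), hs⟩)
        · exact Or.inl hx
        · exact absurd hs h
        · exact Or.inr ⟨hk, hs⟩

theorem gmt_mem_scan (nl : String) (is : List Int) (acc : PySem.Set String) (x : String) :
    x ∈ is.foldl (gmtScanPos nl) acc ↔
      x ∈ acc ∨ (x ∈ gmtKeywords ∧
        ∃ i ∈ is, PySem.Str.startswith (PySem.Str.slice nl (some i) none) x = true) := by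
  induction is generalizing acc with
  | nil => simp
  | cons i is ih =>
    simp only [List.foldl_cons]
    rw [ih]
    show x ∈ gmtScanPos nl acc i ∨ _ ↔ _
    unfold gmtScanPos
    rw [gmt_mem_inner]
    simp only [List.mem_cons]
    constructor
    · rintro ((hx | ⟨hk, hs⟩) | ⟨hk, j, hj, hs⟩)
      · exact Or.inl hx
      · exact Or.inr ⟨hk, i, Or.inl rfl, hs⟩
      · exact Or.inr ⟨hk, j, Or.inr hj, hs⟩
    · rintro (hx | ⟨hk, j, (rfl | hj), hs⟩)
      · exact Or.inl (Or.inl hx)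
      · exact Or.inl (Or.inr ⟨hk, hs⟩)
      · exact Or.inr ⟨hk, j, hj, hs⟩

theorem gmt_found_iff (nl x : String) (hx : x ∈ gmtKeywords) (hne : x.toList ≠ []) :
    x ∈ (PySem.List.pyRange 0 (PySem.Str.len nl + 1) 1).foldl (gmtScanPos nl) PySem.Set.empty ↔
      PySem.Str.isIn x nl = true := by
  rw [gmt_mem_scan, PySem.Str.isIn_eq, ← PySem.Chars.exists_prefix_drop_iff_isIn]
  constructor
  · rintro (hx0 | ⟨-, i, hi, hs⟩)
    · cases hx0
    · rw [PySem.List.mem_pyRange_one] at hi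
      rw [PySem.Str.startswith_eq, PySem.Str.toList_slice] at hs
      unfold PySem.Chars.slice at hs
      rw [PySem.List.slice_from _ hi.1] at hs
      unfold PySem.Chars.startswith at hs
      exact ⟨i.toNat, List.isPrefixOf_iff_prefix.mp hs⟩
  · rintro ⟨j, hj⟩
    have hjle : j ≤ nl.toList.length := by
      by_contra hgt
      rw [List.drop_eq_nil_of_le (le_of_lt (lt_of_not_ge hgt))] at hj
      exact hne (List.prefix_nil.mp hj)
    refine Or.inr ⟨hx, (j : Int), ?_, ?_⟩
    · rw [PySem.List.mem_pyRange_one, PySem.Str.len_eq]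
      constructor
      · exact Int.natCast_nonneg j
      · omega
    · rw [PySem.Str.startswith_eq, PySem.Str.toList_slice]
      unfold PySem.Chars.slice
      rw [PySem.List.slice_from _ (Int.natCast_nonneg j)]
      simp only [Int.toNat_natCast]
      unfold PySem.Chars.startswith
      exact List.isPrefixOf_iff_prefix.mpr hj

theorem gmt_inter_ne_nil (kws t : List String) :
    (PySem.Set.inter kws t ≠ []) ↔ ∃ k ∈ kws, k ∈ t := by
  unfold PySem.Set.inter
  rw [ne_eq, List.filter_eq_nil_iff]
  push_neg
  simp only [PySem.Set.contains_eq_listContains, List.contains_iff_mem]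

set_option maxHeartbeats 2000000 in
-- ===== VERDICT (by name: the statement is the Claim_ definition above) =====
theorem generate_model_tags_py_spec : Claim_equal_generate_model_tags_py := by
  intro plugin_name model_name _
  unfold Spec_generate_model_tags_py generate_model_tags_py generate_model_tags_py_alt
  simp only []
  generalize hnl : PySem.Str.lower model_name = nl
  generalize PySem.Str.replace plugin_name "_" "-" = t0
  have hfound : ∀ x ∈ gmtKeywords,
      (x ∈ (PySem.List.pyRange 0 (PySem.Str.len nl + 1) 1).foldl (gmtScanPos nl) PySem.Set.empty ↔
        PySem.Str.isIn x nl = true) := by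
    intro x hx
    apply gmt_found_iff nl x hx
    fin_cases hx <;> decide
  generalize hF : (PySem.List.pyRange 0 (PySem.Str.len nl + 1) 1).foldl (gmtScanPos nl) PySem.Set.empty = F at hfound
  have h1 := hfound "mini" (by decide)
  have h2 := hfound "small" (by decide)
  have h3 := hfound "7b" (by decide)
  have h4 := hfound "medium" (by decide)
  have h5 := hfound "13b" (by decide)
  have h6 := hfound "large" (by decide)
  have h7 := hfound "30b" (by decide)
  have h8 := hfound "33b" (by decide)
  have h9 := hfound "70b" (by decide)
  have hc1 := hfound "chat" (by decide)
  have hc2 := hfound "code" (by decide)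
  have hc3 := hfound "instruct" (by decide)
  have hc4 := hfound "turbo" (by decide)
  have hc5 := hfound "gpt-4" (by decide)
  have hc6 := hfound "opus" (by decide)
  simp only [gmtSizeLoop, gmtSizeGroups, gmtFeatureLoop, gmtFeatureGroups,
    gmt_inter_ne_nil, PySem.Set.mem_ofList, List.exists_mem_cons_iff, List.not_mem_nil,
    false_and, exists_false, or_false,
    h1, h2, h3, h4, h5, h6, h7, h8, h9, hc1, hc2, hc3, hc4, hc5, hc6,
    List.any_cons, List.any_nil, Bool.or_false, Bool.or_eq_true]
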